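-- pv_equiv track=rewrite | github.com/release-engineering/productmd | productmd/cli/progress.py | _format_filename
-- ===== SOURCE A (Python) =====
-- _DESC_WIDTH = 50
--
-- def _format_filename(path: str, max_width: int = _DESC_WIDTH) -> str:
--     """
--     Truncate a file path to fit within *max_width* characters.
--
--     Short paths are right-padded with spaces.  Long paths have
--     their middle directory components replaced with ``...``,
--     cutting at ``/`` boundaries to preserve readability.  The
--     beginning (variant/arch) and end (filename) of the path
--     are always preserved.
--
--     :param path: File path to format
--     :type path: str
--     :param max_width: Maximum width in characters (default: 50)
--     :type max_width: int
--     :return: Formatted path string, exactly *max_width* characters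
--     :rtype: str
--     """
--     if len(path) <= max_width:
--         return path.ljust(max_width)
--
--     parts = path.split("/")
--     basename = parts[-1]
--
--     # If basename alone is too long, truncate it with leading ...
--     if len(basename) >= max_width - 3:
--         return ("..." + basename[-(max_width - 3) :]).ljust(max_width)
--
--     # Remove middle components one by one until prefix/.../basename fits
--     prefix_parts = parts[:-1]
--     while prefix_parts:
--         candidate = "/".join(prefix_parts) + "/.../" + basename
--         if len(candidate) <= max_width:
--             return candidate.ljust(max_width)
--         prefix_parts.pop()
--
--     # Nothing fits with a prefix — just show .../basename
--     return (".../" + basename).ljust(max_width)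
-- ===== SOURCE B (Python) =====
-- def _format_filename(path: str, max_width: int = 50) -> str:
--     if len(path) <= max_width:
--         return path.ljust(max_width)
--
--     parts = path.split("/")
--     basename = parts[-1]
--
--     if len(basename) >= max_width - 3:
--         return ("..." + basename[-(max_width - 3):]).ljust(max_width)
--
--     # Arithmetic scan: instead of joining and re-joining shrinking prefixes,
--     # track the would-be joined length with prefix sums and join once at the end.
--     prefix = parts[:-1]
--     lens = [len(p) for p in prefix]
--     total = sum(lens) + len(prefix) - 1          # == len("/".join(prefix))
--     budget = max_width - 5 - len(basename)       # room left for the joined prefix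
--     m = len(prefix)
--     while m >= 1 and total > budget:
--         m -= 1
--         total -= lens[m] + 1
--     if m >= 1:
--         return ("/".join(prefix[:m]) + "/.../" + basename).ljust(max_width)
--     return (".../" + basename).ljust(max_width)
-- ===== Notes on version B (the rewrite author's own statement) =====
-- stated objective: alternative
-- what changed: The shrink-until-fit loop no longer builds '/'.join of each shrinking prefix: B precomputes component lengths, scans the fitting prefix count arithmetically (subtracting len+1 per dropped component), and materializes the join only once for the winner; avoids A's worst-case re-joining at similar typical cost.
import Mathlib
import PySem

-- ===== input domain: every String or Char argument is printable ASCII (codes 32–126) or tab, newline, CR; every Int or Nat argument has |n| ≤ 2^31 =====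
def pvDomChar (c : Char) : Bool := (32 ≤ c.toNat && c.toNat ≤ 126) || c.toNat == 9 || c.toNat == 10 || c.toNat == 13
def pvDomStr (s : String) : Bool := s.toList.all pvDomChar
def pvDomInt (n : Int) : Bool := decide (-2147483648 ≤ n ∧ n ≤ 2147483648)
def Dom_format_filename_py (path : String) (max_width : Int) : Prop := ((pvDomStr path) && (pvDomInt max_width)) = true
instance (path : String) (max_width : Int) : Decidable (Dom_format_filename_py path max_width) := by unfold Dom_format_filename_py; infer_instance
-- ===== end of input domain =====

-- B replaces A's join-per-iteration shrink loop by a prefix-sum arithmetic scan that joins once (alternative algorithm; no speed claim).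

-- s.ljust(w): pad on the right with spaces to width w (exact: Python pads max(0, w-len) spaces)
def pvLjust (s : List Char) (w : Int) : List Char :=
  s ++ List.replicate (w - (s.length : Int)).toNat ' '

-- ===== PORT A =====
-- the while loop: pop the last prefix component until the joined candidate fits; none = loop exhausted
def pvALoop (basename : List Char) (max_width : Int) : List (List Char) → Option (List Char)
  | [] => none
  | p :: ps =>
    let candidate := PySem.Chars.join ['/'] (p :: ps) ++ ('/' :: '.' :: '.' :: '.' :: '/' :: []) ++ basename
    if (candidate.length : Int) ≤ max_width then some (pvLjust candidate max_width)
    else pvALoop basename max_width (p :: ps).dropLast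
termination_by l => l.length
decreasing_by simp

def format_filename_py (path : String) (max_width : Int) : String :=
  if PySem.Str.len path ≤ max_width then String.ofList (pvLjust path.toList max_width)
  else
    let parts := PySem.Chars.splitOn path.toList ['/']
    let basename := PySem.List.pyGetD parts (-1) []
    if max_width - 3 ≤ (basename.length : Int) then
      String.ofList (pvLjust (('.' :: '.' :: '.' :: []) ++ PySem.List.slice basename (some (-(max_width - 3))) none) max_width)
    else
      match pvALoop basename max_width (PySem.List.slice parts none (some (-1))) with
      | some r => String.ofList r
      | none => String.ofList (pvLjust (('.' :: '.' :: '.' :: '/' :: []) ++ basename) max_width)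

-- ===== PORT B =====
-- the while loop of Source B: m, total = count and would-be joined length of the first m components
def pvBLoop (lens : List Int) (budget : Int) : Nat → Int → Nat × Int
  | 0, total => (0, total)
  | m + 1, total =>
    if budget < total then
      pvBLoop lens budget m (total - (PySem.List.pyGetD lens (m : Int) 0 + 1))
    else (m + 1, total)

def format_filename_py_alt (path : String) (max_width : Int) : String :=
  if PySem.Str.len path ≤ max_width then String.ofList (pvLjust path.toList max_width)
  else
    let parts := PySem.Chars.splitOn path.toList ['/']
    let basename := PySem.List.pyGetD parts (-1) []
    if max_width - 3 ≤ (basename.length : Int) then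
      String.ofList (pvLjust (('.' :: '.' :: '.' :: []) ++ PySem.List.slice basename (some (-(max_width - 3))) none) max_width)
    else
      let pre := PySem.List.slice parts none (some (-1))
      let lens := pre.map (fun p => (p.length : Int))
      let total := lens.sum + pre.length - 1
      let budget := max_width - 5 - basename.length
      let r := pvBLoop lens budget pre.length total
      if 1 ≤ r.1 then
        String.ofList (pvLjust (PySem.Chars.join ['/'] (pre.take r.1) ++ ('/' :: '.' :: '.' :: '.' :: '/' :: []) ++ basename) max_width)
      else
        String.ofList (pvLjust (('.' :: '.' :: '.' :: '/' :: []) ++ basename) max_width)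

-- ===== PRECONDITION & SPEC =====
def Spec_format_filename_py (path : String) (max_width : Int) (out : String) : Prop := out = format_filename_py_alt path max_width
instance (path : String) (max_width : Int) (out : String) : Decidable (Spec_format_filename_py path max_width out) := by unfold Spec_format_filename_py; infer_instance

-- ===== CLAIM (what is proved, stated in full; the proofs are below) =====
def Claim_equal_format_filename_py : Prop := ∀ (path : String) (max_width : Int), Dom_format_filename_py path max_width → Spec_format_filename_py path max_width (format_filename_py path max_width)

-- ===== LEMMAS AND PROOFS =====

-- len("/".join ps) = sum of component lengths + (#ps - 1), for nonempty ps
lemma pvJoinLen : ∀ ps : List (List Char), ps ≠ [] →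
    ((PySem.Chars.join ['/'] ps).length : Int)
      = (ps.map (fun p => (p.length : Int))).sum + ps.length - 1 := by
  intro ps
  induction ps with
  | nil => intro h; exact absurd rfl h
  | cons a t ih =>
    intro _
    cases t with
    | nil => simp [PySem.Chars.join_singleton]
    | cons b u =>
      have this := ih (by simp)
      rw [PySem.Chars.join_cons_cons]
      simp only [List.length_append, List.map_cons, List.sum_cons, List.length_cons, List.length_nil] at this ⊢
      push_cast at this ⊢
      omega

-- the two loops agree: A's loop on the first-m prefix equals B's arithmetic scan from m
lemma pvLoopEq (basename : List Char) (mw : Int) (pre : List (List Char)) :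
    ∀ m : Nat, m ≤ pre.length →
    pvALoop basename mw (pre.take m)
      = (let r := pvBLoop (pre.map (fun p => (p.length : Int))) (mw - 5 - basename.length) m
            (((pre.take m).map (fun p => (p.length : Int))).sum + m - 1);
         if 1 ≤ r.1 then
           some (pvLjust (PySem.Chars.join ['/'] (pre.take r.1) ++ ('/' :: '.' :: '.' :: '.' :: '/' :: []) ++ basename) mw)
         else none) := by
  intro m
  induction m with
  | zero => intro _; simp [pvALoop, pvBLoop]
  | succ m ih =>
    intro hm
    have hm' : m ≤ pre.length := Nat.le_of_succ_le hm
    have hne : pre.take (m + 1) ≠ [] := by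
      have : (pre.take (m + 1)).length = m + 1 := by
        rw [List.length_take]; omega
      intro h; rw [h] at this; simp at this
    obtain ⟨p, ps, hps⟩ : ∃ p ps, pre.take (m + 1) = p :: ps := by
      cases h : pre.take (m + 1) with
      | nil => exact absurd h hne
      | cons p ps => exact ⟨p, ps, rfl⟩
    have hdl : (pre.take (m + 1)).dropLast = pre.take m := by
      rw [List.dropLast_eq_take, List.take_take]
      congr 1
      rw [List.length_take]; omega
    have hlen : ((PySem.Chars.join ['/'] (pre.take (m+1)) ++ ('/' :: '.' :: '.' :: '.' :: '/' :: []) ++ basename).length : Int)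
        = (((pre.take (m+1)).map (fun p => (p.length : Int))).sum + (m+1) - 1) + 5 + basename.length := by
      have hj := pvJoinLen (pre.take (m+1)) hne
      have hl : (pre.take (m+1)).length = m + 1 := by rw [List.length_take]; omega
      rw [hl] at hj
      simp only [List.length_append, List.length_cons, List.length_nil]
      push_cast at hj ⊢
      omega
    have hget : PySem.List.pyGetD (pre.map (fun p => (p.length : Int))) (m : Int) 0
        = ((pre[m]'(by omega)).length : Int) := by
      rw [PySem.List.pyGetD_natCast]
      rw [List.getD_eq_getElem?_getD]
      simp [List.getElem?_eq_getElem (by simpa using (show m < pre.length by omega) : m < (pre.map (fun p => (p.length : Int))).length)]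
    have htot : (((pre.take (m+1)).map (fun p => (p.length : Int))).sum + ((m:Int)+1) - 1)
          - (((pre[m]'(by omega)).length : Int) + 1)
        = ((pre.take m).map (fun p => (p.length : Int))).sum + m - 1 := by
      have h : pre.take (m+1) = pre.take m ++ [pre[m]'(by omega)] := by
        rw [List.take_add_one]
        simp [List.getElem?_eq_getElem (show m < pre.length by omega)]
      rw [h]
      simp only [List.map_append, List.sum_append, List.map_cons, List.map_nil, List.sum_cons,
        List.sum_nil]
      ring
    rw [hps, pvALoop]
    simp only
    rw [← hps, hdl]
    simp only [pvBLoop, hget]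
    push_cast at hlen htot ⊢
    by_cases hfit : ((PySem.Chars.join ['/'] (pre.take (m+1)) ++ ('/' :: '.' :: '.' :: '.' :: '/' :: []) ++ basename).length : Int) ≤ mw
    · have hnc : ¬ (mw - 5 - (basename.length : Int) <
          ((pre.take (m+1)).map (fun p => (p.length : Int))).sum + ((m : Int) + 1) - 1) := by
        omega
      rw [if_pos hfit, if_neg hnc]
      simp
    · have hc : mw - 5 - (basename.length : Int) <
          ((pre.take (m+1)).map (fun p => (p.length : Int))).sum + ((m : Int) + 1) - 1 := by
        omega
      rw [if_neg hfit, if_pos hc, htot]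
      exact ih hm'

-- ===== VERDICT (by name: the statement is the Claim_ definition above) =====
theorem format_filename_py_spec : Claim_equal_format_filename_py := by
  intro path mw _
  unfold Spec_format_filename_py format_filename_py format_filename_py_alt
  by_cases h1 : PySem.Str.len path ≤ mw
  · simp only [if_pos h1]
  · simp only [if_neg h1]
    by_cases h2 : mw - 3 ≤ ((PySem.List.pyGetD (PySem.Chars.splitOn path.toList ['/']) (-1) []).length : Int)
    · simp only [if_pos h2]
    · simp only [if_neg h2]
      have hL := pvLoopEq (PySem.List.pyGetD (PySem.Chars.splitOn path.toList ['/']) (-1) []) mw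
        (PySem.List.slice (PySem.Chars.splitOn path.toList ['/']) none (some (-1)))
        (PySem.List.slice (PySem.Chars.splitOn path.toList ['/']) none (some (-1))).length le_rfl
      rw [List.take_length] at hL
      rw [hL]
      simp only
      split_ifs with hr <;> rfl
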